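-- pv_equiv track=rewrite | github.com/archeraghi/swarm-sim | usecase/leader_coating/solution/leader_coating.py | reduce_trail_locations
-- ===== SOURCE A (Python) =====
-- def reduce_trail_locations(trail_locations, subjects_cardinality):
--     i = 0
--     while  len(trail_locations) > subjects_cardinality and trail_locations:
--         if i % 2 == 0:
--             trail_locations.pop(0)
--         elif i % 2 == 1:
--             trail_locations.pop()
--         i += 1
--     return trail_locations
-- ===== SOURCE B (Python) =====
-- def reduce_trail_locations(trail_locations, subjects_cardinality):
--     n = len(trail_locations)
--     k = n - max(subjects_cardinality, 0)
--     if k <= 0: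
--         return trail_locations
--     front = (k + 1) // 2
--     return trail_locations[front : n - (k - front)]
-- ===== Notes on version B (the rewrite author's own statement) =====
-- stated objective: faster
-- what changed: Replaces the alternating pop(0)/pop() loop (each pop(0) shifts the whole list) by computing the number of removals k and returning one slice xs[ceil(k/2) : n - floor(k/2)].
import Mathlib
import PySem

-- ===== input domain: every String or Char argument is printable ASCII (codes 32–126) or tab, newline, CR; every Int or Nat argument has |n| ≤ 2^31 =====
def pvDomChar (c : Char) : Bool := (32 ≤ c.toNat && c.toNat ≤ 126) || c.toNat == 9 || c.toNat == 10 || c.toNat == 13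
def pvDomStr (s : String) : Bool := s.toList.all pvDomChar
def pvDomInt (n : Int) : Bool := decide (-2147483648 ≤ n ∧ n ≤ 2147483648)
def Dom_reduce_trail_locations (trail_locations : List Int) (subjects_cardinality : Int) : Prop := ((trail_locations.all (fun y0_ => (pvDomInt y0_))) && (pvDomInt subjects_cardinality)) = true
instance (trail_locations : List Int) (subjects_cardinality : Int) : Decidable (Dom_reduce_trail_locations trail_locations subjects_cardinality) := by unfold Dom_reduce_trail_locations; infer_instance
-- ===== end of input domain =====

-- B computes the number of removals and returns one slice instead of A's alternating pop(0)/pop() loop.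
-- A mutates its argument in place; the equivalence proved here is about the RETURN value only.

-- ===== PORT A =====
-- the while loop: pop(0) on a nonempty list is `tail`, pop() is `dropLast` (both exact here, the
-- loop condition guarantees the list is nonempty); i is an int, `i % 2` is always 0 or 1, so the
-- `elif i % 2 == 1` branch is exactly the `else` branch.
def reduceA_loop (xs : List Int) (c : Int) (i : Int) : List Int :=
  if h : (xs.length : Int) > c ∧ xs ≠ [] then
    if PySem.Int.mod i 2 = 0 then reduceA_loop xs.tail c (i + 1)
    else reduceA_loop xs.dropLast c (i + 1)
  else xs
termination_by xs.length
decreasing_by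
  · have := List.length_pos_iff.mpr h.2
    simp; omega
  · have := List.length_pos_iff.mpr h.2
    simp; omega

def reduce_trail_locations (trail_locations : List Int) (subjects_cardinality : Int) : List Int :=
  reduceA_loop trail_locations subjects_cardinality 0

-- ===== PORT B =====
def reduce_trail_locations_alt (trail_locations : List Int) (subjects_cardinality : Int) : List Int :=
  let n : Int := trail_locations.length
  let k : Int := n - max subjects_cardinality 0
  if k ≤ 0 then trail_locations
  else
    let front : Int := PySem.Int.floordiv (k + 1) 2
    PySem.List.slice trail_locations (some front) (some (n - (k - front)))

-- ===== PRECONDITION & SPEC =====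
def Spec_reduce_trail_locations (trail_locations : List Int) (subjects_cardinality : Int) (out : List Int) : Prop := out = reduce_trail_locations_alt trail_locations subjects_cardinality
instance (trail_locations : List Int) (subjects_cardinality : Int) (out : List Int) : Decidable (Spec_reduce_trail_locations trail_locations subjects_cardinality out) := by unfold Spec_reduce_trail_locations; infer_instance

-- ===== CLAIM (what is proved, stated in full; the proofs are below) =====
def Claim_equal_reduce_trail_locations : Prop := ∀ (trail_locations : List Int) (subjects_cardinality : Int), Dom_reduce_trail_locations trail_locations subjects_cardinality → Spec_reduce_trail_locations trail_locations subjects_cardinality (reduce_trail_locations trail_locations subjects_cardinality)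

-- ===== LEMMAS AND PROOFS =====

-- the loop reads only the parity of i
theorem reduceA_loop_shift (xs : List Int) (c i : Int) :
    reduceA_loop xs c (i + 2) = reduceA_loop xs c i := by
  unfold reduceA_loop
  by_cases h : (xs.length : Int) > c ∧ xs ≠ []
  · rw [dif_pos h, dif_pos h]
    have hm : PySem.Int.mod (i + 2) 2 = PySem.Int.mod i 2 := by
      rw [PySem.Int.mod_eq_emod_of_pos (by omega), PySem.Int.mod_eq_emod_of_pos (by omega)]
      omega
    rw [hm]
    have h1 : i + 2 + 1 = (i + 1) + 2 := by ring
    split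
    · rw [h1]; exact reduceA_loop_shift xs.tail c (i + 1)
    · rw [h1]; exact reduceA_loop_shift xs.dropLast c (i + 1)
  · rw [dif_neg h, dif_neg h]
termination_by xs.length
decreasing_by
  · have := List.length_pos_iff.mpr h.2
    simp; omega
  · have := List.length_pos_iff.mpr h.2
    simp; omega

-- B's port, rewritten with Nat arithmetic (k.toNat removals, front = (k+1)/2, slice = drop/take)
theorem alt_eq_nat (xs : List Int) (c : Int) :
    reduce_trail_locations_alt xs c =
      if xs.length - c.toNat = 0 then xs
      else (xs.drop ((xs.length - c.toNat + 1) / 2)).take (xs.length - (xs.length - c.toNat)) := by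
  simp only [reduce_trail_locations_alt]
  rw [← Int.toNat_eq_max]
  by_cases hk : (xs.length : Int) - (c.toNat : Int) ≤ 0
  · rw [if_pos hk, if_pos (by omega)]
  · rw [if_neg hk, if_neg (by omega)]
    have hkN : (xs.length : Int) - (c.toNat : Int) = ((xs.length - c.toNat : Nat) : Int) := by omega
    rw [hkN]
    have h1 : ((xs.length - c.toNat : Nat) : Int) + 1 = ((xs.length - c.toNat + 1 : Nat) : Int) := by push_cast; ring
    rw [h1]
    have hfd : PySem.Int.floordiv ((xs.length - c.toNat + 1 : Nat) : Int) 2 = (((xs.length - c.toNat + 1) / 2 : Nat) : Int) := by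
      exact_mod_cast PySem.Int.floordiv_natCast (xs.length - c.toNat + 1) 2
    rw [hfd]
    have h2 : (xs.length : Int) - (((xs.length - c.toNat : Nat) : Int) - ((((xs.length - c.toNat + 1) / 2 : Nat) : Int))) =
        ((xs.length - (xs.length - c.toNat) + (xs.length - c.toNat + 1) / 2 : Nat) : Int) := by
      push_cast; omega
    rw [h2, PySem.List.slice_natCast]
    congr 1
    omega

-- main lemma: the loop started at i = 0 computes B's slice; strong induction two removals at a time
theorem loop_eq_alt (xs : List Int) (c : Int) :
    reduceA_loop xs c 0 = reduce_trail_locations_alt xs c := by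
  rw [alt_eq_nat, reduceA_loop]
  split
  next h =>
    have hne := List.length_pos_iff.mpr h.2
    have h1 := h.1
    rw [if_pos (by decide), reduceA_loop]
    split
    next h2 =>
      -- a second removal happens: the excess k is at least 2
      have hne2 := List.length_pos_iff.mpr h2.2
      have h21 := h2.1
      have hlt : xs.tail.length = xs.length - 1 := List.length_tail
      rw [hlt] at hne2 h21
      have hkN : 2 ≤ xs.length - c.toNat := by omega
      rw [if_neg (by decide)]
      rw [show (0:Int) + 1 + 1 = 0 + 2 by ring, reduceA_loop_shift]
      rw [loop_eq_alt xs.tail.dropLast c]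
      rw [alt_eq_nat]
      have hy : xs.tail.dropLast.length = xs.length - 2 := by
        rw [List.length_dropLast, hlt]; omega
      rw [hy]
      set n := xs.length with hn
      set kN := n - c.toNat with hkdef
      rw [if_neg (show ¬ kN = 0 by omega)]
      have hf1 : n - 2 - c.toNat = kN - 2 := by omega
      rw [hf1]
      set f := (kN + 1) / 2 with hfdef
      by_cases hk2 : kN = 2
      · -- two removals finish: both sides are tail.dropLast
        rw [if_pos (by omega)]
        rw [show f = 1 by omega, List.drop_one]
        rw [List.dropLast_eq_take, hlt]
        congr 1
        omega
      · rw [if_neg (by omega)]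
        have hf2 : (kN - 2 + 1) / 2 = f - 1 := by omega
        rw [hf2]
        have hf3 : 1 ≤ f ∧ f + 1 ≤ kN := by constructor <;> omega
        have hd1 : xs.tail.dropLast.drop (f - 1) = (xs.drop f).dropLast := by
          rw [List.dropLast_eq_take, List.drop_take, List.dropLast_eq_take, hlt,
              List.drop_tail, List.length_drop]
          have hff : f - 1 + 1 = f := by omega
          rw [hff]
          congr 1
          omega
        rw [hd1]
        rw [List.dropLast_eq_take, List.take_take, List.length_drop]
        congr 1
        omega
    next h2 =>
      -- the loop stops after one removal: the excess was exactly 1, both sides are the tail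
      have hlt : xs.tail.length = xs.length - 1 := List.length_tail
      have hk1 : xs.length - c.toNat = 1 := by
        rcases not_and_or.mp h2 with h3 | h3
        · push_neg at h3
          rw [hlt] at h3
          omega
        · push_neg at h3
          have : xs.tail.length = 0 := by rw [h3]; rfl
          omega
      rw [if_neg (by omega), hk1]
      have : xs.drop ((1 + 1) / 2) = xs.tail := by rw [show (1+1)/2 = 1 from rfl, List.drop_one]
      rw [this]
      rw [show xs.length - 1 = xs.tail.length by omega, List.take_length]
  next h =>
    -- the loop never runs: the excess is 0
    rw [if_pos ?_]
    rcases not_and_or.mp h with h3 | h3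
    · push_neg at h3; omega
    · push_neg at h3
      have : xs.length = 0 := by rw [h3]; rfl
      omega
termination_by xs.length
decreasing_by
  rw [List.length_dropLast, hlt]
  omega

-- ===== VERDICT (by name: the statement is the Claim_ definition above) =====
theorem reduce_trail_locations_spec : Claim_equal_reduce_trail_locations := by
  intro xs c _
  unfold Spec_reduce_trail_locations reduce_trail_locations
  exact loop_eq_alt xs c
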